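-- pv_equiv track=rewrite | github.com/tchtinku/Ace_Programming | Strings/AnagramSubstringSearch/SlidingWindow/AnagramSubstringSearch.py | find_anagrams_sliding_window
-- ===== SOURCE A (Python) =====
-- def find_anagrams_sliding_window(str, ptr):
--     n, m = len(str), len(ptr)
--     if m>n:   # If pattern length is greater than string, no anagrams possible
--         return []
--
--     # Frequency maps for str and ptr
--     strMap = [0]*26
--     ptrMap = [0]*26
--     result = []
--
--     # Build frequency map for str
--     for ch in ptr:
--         ptrMap[ord(ch) - ord('a')] += 1
--
--     # Build initial window in str
--     for i in range(m):
--         strMap[ord(str[i]) - ord('a')] += 1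
--
--     # Check if the initial window is an anagram
--     if strMap == ptrMap:
--         result.append(0)
--
--     # Sliding Window
--     for i in range(m, n):
--         # Remove the character going out of window
--         strMap[ord(str[i - m]) - ord('a')] -= 1
--         # Add the character coming into the window
--         strMap[ord(str[i]) - ord('a')] += 1
--         # Check if the current window is an anagram
--         if strMap == ptrMap:
--             result.append(i-m+1)
--
--     return result
-- ===== SOURCE B (Python) =====
-- def find_anagrams_sliding_window(str, ptr):
--     n, m = len(str), len(ptr)
--     if m > n:   # pattern longer than string: no anagrams possible
--         return []
--     target = [0]*26
--     for ch in ptr: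
--         target[ord(ch) - ord('a')] += 1
--     # prefix[k] = letter counts of str[:k]; built once, no sliding updates
--     prefix = [[0]*26]
--     for ch in str:
--         row = prefix[-1][:]
--         row[ord(ch) - ord('a')] += 1
--         prefix.append(row)
--     # a window [i, i+m) is an anagram iff prefix[i+m] - prefix[i] == target
--     return [i for i in range(n - m + 1)
--             if [a - b for a, b in zip(prefix[i + m], prefix[i])] == target]
-- ===== Notes on version B (the rewrite author's own statement) =====
-- stated objective: alternative
-- what changed: B abandons the sliding-window updates entirely: it builds a prefix table of letter counts for every prefix of str in one staged pass and then tests each start i by comparing the vector difference prefix[i+m]-prefix[i] against the pattern counts; Pre_ excludes only inputs where A raises IndexError (B raises there too).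
import Mathlib
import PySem

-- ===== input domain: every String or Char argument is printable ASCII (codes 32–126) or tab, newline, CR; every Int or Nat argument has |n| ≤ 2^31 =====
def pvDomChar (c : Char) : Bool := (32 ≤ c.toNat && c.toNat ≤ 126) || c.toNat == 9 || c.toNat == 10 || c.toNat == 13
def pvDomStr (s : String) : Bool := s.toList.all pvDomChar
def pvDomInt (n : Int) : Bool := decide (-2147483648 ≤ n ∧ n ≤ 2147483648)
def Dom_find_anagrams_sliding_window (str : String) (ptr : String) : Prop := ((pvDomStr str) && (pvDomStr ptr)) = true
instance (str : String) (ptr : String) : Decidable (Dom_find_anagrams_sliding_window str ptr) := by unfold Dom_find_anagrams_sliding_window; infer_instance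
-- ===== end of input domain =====

-- B drops the sliding updates: it builds a prefix table of letter counts of every
-- prefix of str in one staged pass and tests each start by a prefix-difference
-- comparison against the pattern counts (alternative algorithm, same results).

-- ===== PORT A =====
-- l[j] += d / l[j] -= d, with Python's (possibly negative) indexing
def pvBump (l : List Int) (j d : Int) : List Int :=
  PySem.List.pySetD l j (PySem.List.pyGetD l j 0 + d)

-- body of A's sliding loop
def pvStepA (s : List Char) (m : Int) (ptrMap : List Int)
    (st : List Int × List Int) (i : Int) : List Int × List Int :=
  let mp := pvBump st.1 (((PySem.List.pyGetD s (i - m) ' ').toNat : Int) - 97) (-1)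
  let mp := pvBump mp (((PySem.List.pyGetD s i ' ').toNat : Int) - 97) 1
  (mp, if mp = ptrMap then st.2 ++ [i - m + 1] else st.2)

def find_anagrams_sliding_window (str : String) (ptr : String) : List Int :=
  let s := str.toList
  let p := ptr.toList
  let n : Int := (s.length : Int)
  let m : Int := (p.length : Int)
  if m > n then []
  else
    let ptrMap := p.foldl (fun mp ch => pvBump mp ((ch.toNat : Int) - 97) 1) (List.replicate 26 0)
    let strMap := (PySem.List.pyRange 0 m 1).foldl
      (fun mp i => pvBump mp (((PySem.List.pyGetD s i ' ').toNat : Int) - 97) 1) (List.replicate 26 0)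
    let result : List Int := if strMap = ptrMap then [0] else []
    ((PySem.List.pyRange m n 1).foldl (pvStepA s m ptrMap) (strMap, result)).2

-- ===== PORT B =====
-- one step of the prefix-table build: append a copy of the last row with one slot bumped
def pvRowB (pref : List (List Int)) (ch : Char) : List (List Int) :=
  pref ++ [pvBump (PySem.List.pyGetD pref (-1) []) ((ch.toNat : Int) - 97) 1]

def find_anagrams_sliding_window_alt (str : String) (ptr : String) : List Int :=
  let s := str.toList
  let p := ptr.toList
  let n : Int := (s.length : Int)
  let m : Int := (p.length : Int)
  if m > n then []
  else
    let target := p.foldl (fun l ch => pvBump l ((ch.toNat : Int) - 97) 1) (List.replicate 26 0)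
    let pre := s.foldl pvRowB [List.replicate 26 0]
    (PySem.List.pyRange 0 (n - m + 1) 1).foldl (fun acc i =>
      if List.zipWith (fun a b => a - b) (PySem.List.pyGetD pre (i + m) [])
           (PySem.List.pyGetD pre i []) = target
      then acc ++ [i] else acc) []

-- ===== PRECONDITION & SPEC =====
-- Pre_ excludes exactly the inputs on which A raises IndexError: when the pattern fits,
-- every character of both strings must have code in [71,122] (ord(c)-ord('a') ∈ [-26,25]);
-- B raises IndexError on the same inputs.
def Pre_find_anagrams_sliding_window (str : String) (ptr : String) : Prop :=
  str.toList.length < ptr.toList.length ∨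
  ((ptr.toList ++ str.toList).all (fun c => decide (71 ≤ c.toNat ∧ c.toNat ≤ 122)) = true)
instance (str : String) (ptr : String) : Decidable (Pre_find_anagrams_sliding_window str ptr) := by
  unfold Pre_find_anagrams_sliding_window; infer_instance

def pvWitness_find_anagrams_sliding_window : String × String := ("ab", "b")

def Spec_find_anagrams_sliding_window (str : String) (ptr : String) (out : List Int) : Prop := out = find_anagrams_sliding_window_alt str ptr
instance (str : String) (ptr : String) (out : List Int) : Decidable (Spec_find_anagrams_sliding_window str ptr out) := by unfold Spec_find_anagrams_sliding_window; infer_instance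

-- ===== CLAIM (what is proved, stated in full; the proofs are below) =====
def Claim_equal_find_anagrams_sliding_window : Prop := ∀ (str : String) (ptr : String), Dom_find_anagrams_sliding_window str ptr → Pre_find_anagrams_sliding_window str ptr → Spec_find_anagrams_sliding_window str ptr (find_anagrams_sliding_window str ptr)

-- ===== LEMMAS AND PROOFS =====

-- effective (Python-normalised) bucket index, for buckets in [-26, 25] of a 26-list
def pvE (j : Int) : Nat := (if 0 ≤ j then j else j + 26).toNat

-- validity of a character: its bucket ord(c)-97 lies in [-26, 25]
def pvOk (c : Char) : Prop := 71 ≤ c.toNat ∧ c.toNat ≤ 122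

-- a single `l[ord(c)-97] += 1`
def pvBmp (l : List Int) (c : Char) : List Int := pvBump l ((c.toNat : Int) - 97) 1

-- letter counts of a list of characters (what both programs' count arrays hold)
def pvCnt (cs : List Char) : List Int := cs.foldl pvBmp (List.replicate 26 0)

theorem pvE_lt (j : Int) (h1 : -26 ≤ j) (h2 : j < 26) : pvE j < 26 := by
  unfold pvE; split_ifs <;> omega

theorem pvGetE (l : List Int) (j : Int) (hl : l.length = 26) (h1 : -26 ≤ j) (h2 : j < 26) :
    PySem.List.pyGetD l j 0 = l.getD (pvE j) 0 := by
  simp only [PySem.List.pyGetD, PySem.List.pyGet?, PySem.List.pyIdx?, hl, pvE]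
  split_ifs with ha hb hc
  · simp [List.getD]
  · omega
  · have : (26 : Nat) - (-j).toNat = (j + 26).toNat := by omega
    simp [List.getD, this]
  · omega

theorem pvSetE (l : List Int) (j v : Int) (hl : l.length = 26) (h1 : -26 ≤ j) (h2 : j < 26) :
    PySem.List.pySetD l j v = l.set (pvE j) v := by
  simp only [PySem.List.pySetD, PySem.List.pySet?, PySem.List.pyIdx?, hl, pvE]
  split_ifs with ha hb hc
  · simp
  · omega
  · have : (26 : Nat) - (-j).toNat = (j + 26).toNat := by omega
    simp [this]
  · omega

theorem pvBumpE (l : List Int) (j d : Int) (hl : l.length = 26) (h1 : -26 ≤ j) (h2 : j < 26) :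
    pvBump l j d = l.set (pvE j) (l.getD (pvE j) 0 + d) := by
  unfold pvBump; rw [pvGetE l j hl h1 h2, pvSetE l _ _ hl h1 h2]

theorem pvOk_range (c : Char) (h : pvOk c) :
    -26 ≤ (c.toNat : Int) - 97 ∧ (c.toNat : Int) - 97 < 26 := by
  obtain ⟨h1, h2⟩ := h; constructor <;> omega

theorem pvBmpE (l : List Int) (c : Char) (hl : l.length = 26) (hc : pvOk c) :
    pvBmp l c = l.set (pvE ((c.toNat : Int) - 97))
      (l.getD (pvE ((c.toNat : Int) - 97)) 0 + 1) := by
  obtain ⟨h1, h2⟩ := pvOk_range c hc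
  exact pvBumpE l _ 1 hl h1 h2

theorem pvBmp_len (l : List Int) (c : Char) (hl : l.length = 26) (hc : pvOk c) :
    (pvBmp l c).length = 26 := by
  rw [pvBmpE l c hl hc]; simp [hl]

theorem pvFold_len (cs : List Char) (hcs : ∀ c ∈ cs, pvOk c) :
    ∀ a : List Int, a.length = 26 → (cs.foldl pvBmp a).length = 26 := by
  induction cs with
  | nil => intro a ha; simpa using ha
  | cons c cs ih =>
    intro a ha
    exact ih (fun x hx => hcs x (by simp [hx])) _ (pvBmp_len a c ha (hcs c (by simp)))

theorem pvCnt_len (cs : List Char) (hcs : ∀ c ∈ cs, pvOk c) : (pvCnt cs).length = 26 :=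
  pvFold_len cs hcs _ (by simp)

-- the central additivity lemma: folding bumps over cs onto a adds pvCnt cs pointwise
theorem pvFold_add (cs : List Char) (hcs : ∀ c ∈ cs, pvOk c) :
    ∀ a : List Int, a.length = 26 →
    cs.foldl pvBmp a = List.zipWith (fun x y => x + y) a (pvCnt cs) := by
  induction cs with
  | nil =>
    intro a ha
    apply List.ext_getElem (by simp [pvCnt, ha])
    intro n h1 h2
    simp only [List.foldl_nil, List.getElem_zipWith, pvCnt, List.getElem_replicate, add_zero]
  | cons c cs ih =>
    intro a ha
    have hc := hcs c (by simp)
    have htail : ∀ x ∈ cs, pvOk x := fun x hx => hcs x (by simp [hx])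
    have hlen := pvBmp_len a c ha hc
    have hzlen : (pvBmp (List.replicate 26 (0 : Int)) c).length = 26 :=
      pvBmp_len _ c (by simp) hc
    have hcnt : pvCnt (c :: cs)
        = List.zipWith (fun x y => x + y) (pvBmp (List.replicate 26 0) c) (pvCnt cs) := by
      show cs.foldl pvBmp (pvBmp (List.replicate 26 0) c) = _
      exact ih htail _ hzlen
    have hclen := pvCnt_len cs htail
    rw [List.foldl_cons, ih htail _ hlen, hcnt]
    obtain ⟨hr1, hr2⟩ := pvOk_range c hc
    have helt := pvE_lt _ hr1 hr2
    have hbmpa := pvBmpE a c ha hc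
    have hbmpz := pvBmpE (List.replicate 26 0) c (by simp) hc
    apply List.ext_getElem (by
      rw [List.length_zipWith, List.length_zipWith, List.length_zipWith, hlen, hclen, ha, hzlen]; omega)
    intro n h1 h2
    have hn : n < 26 := by simp [hlen, hclen] at h1; omega
    have h0 : (List.replicate 26 (0 : Int)).getD (pvE ((c.toNat : Int) - 97)) 0 = 0 := by
      rw [List.getD_eq_getElem _ 0 (by simpa using helt)]; exact List.getElem_replicate ..
    have hgd : a[pvE ((c.toNat : Int) - 97)]'(by omega) = a.getD (pvE ((c.toNat : Int) - 97)) 0 :=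
      (List.getD_eq_getElem a 0 (by omega)).symm
    simp only [List.getElem_zipWith, hbmpa, hbmpz, List.getElem_set]
    split_ifs with h
    · subst h; rw [hgd]; simp only [h0]; ring
    · rw [List.getElem_replicate]; ring

theorem pvCnt_append (u v : List Char) (hu : ∀ c ∈ u, pvOk c) (hv : ∀ c ∈ v, pvOk c) :
    pvCnt (u ++ v) = List.zipWith (fun x y => x + y) (pvCnt u) (pvCnt v) := by
  show (u ++ v).foldl pvBmp (List.replicate 26 0) = _
  rw [List.foldl_append]
  exact pvFold_add v hv _ (pvCnt_len u hu)

-- prefix difference: counts of u++v minus counts of u are the counts of v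
theorem pvSub_cnt (u v : List Char) (hu : ∀ c ∈ u, pvOk c) (hv : ∀ c ∈ v, pvOk c) :
    List.zipWith (fun x y => x - y) (pvCnt (u ++ v)) (pvCnt u) = pvCnt v := by
  have hul := pvCnt_len u hu
  have hvl := pvCnt_len v hv
  have huv : ∀ c ∈ u ++ v, pvOk c := by
    intro c hcm; rcases List.mem_append.mp hcm with h | h
    · exact hu c h
    · exact hv c h
  rw [pvCnt_append u v hu hv]
  apply List.ext_getElem (by rw [List.length_zipWith, List.length_zipWith, hul, hvl]; omega)
  intro n h1 h2
  simp only [List.getElem_zipWith]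
  ring

-- removing the head character undoes its bump
theorem pvRemove_head (c : Char) (rest : List Char) (hc : pvOk c) (hrest : ∀ x ∈ rest, pvOk x) :
    pvBump (pvCnt (c :: rest)) ((c.toNat : Int) - 97) (-1) = pvCnt rest := by
  obtain ⟨hr1, hr2⟩ := pvOk_range c hc
  have helt := pvE_lt _ hr1 hr2
  have hzlen : (pvBmp (List.replicate 26 (0 : Int)) c).length = 26 :=
    pvBmp_len _ c (by simp) hc
  have hrl := pvCnt_len rest hrest
  have hcons : pvCnt (c :: rest)
      = List.zipWith (fun x y => x + y) (pvBmp (List.replicate 26 0) c) (pvCnt rest) := by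
    show rest.foldl pvBmp (pvBmp (List.replicate 26 0) c) = _
    exact pvFold_add rest hrest _ hzlen
  have hclen : (pvCnt (c :: rest)).length = 26 := by
    rw [hcons, List.length_zipWith, hzlen, hrl]; omega
  rw [pvBumpE _ _ _ hclen hr1 hr2]
  have hbmpz := pvBmpE (List.replicate 26 0) c (by simp) hc
  have h0 : (List.replicate 26 (0 : Int)).getD (pvE ((c.toNat : Int) - 97)) 0 = 0 := by
    rw [List.getD_eq_getElem _ 0 (by simpa using helt)]; exact List.getElem_replicate ..
  have hgd : (pvCnt (c :: rest)).getD (pvE ((c.toNat : Int) - 97)) 0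
      = (pvCnt (c :: rest))[pvE ((c.toNat : Int) - 97)]'(by omega) :=
    List.getD_eq_getElem _ 0 (by omega)
  apply List.ext_getElem (by simp [hclen, hrl])
  intro n h1 h2
  have hn : n < 26 := by omega
  rw [List.getElem_set]
  by_cases h : pvE ((c.toNat : Int) - 97) = n
  · subst h
    rw [if_pos rfl, hgd]
    simp only [hcons, List.getElem_zipWith, hbmpz, List.getElem_set, if_true, h0]
    ring
  · rw [if_neg h]
    simp only [hcons, List.getElem_zipWith, hbmpz, List.getElem_set, if_neg h]
    rw [List.getElem_replicate]
    ring

theorem pvCnt_snoc (u : List Char) (c : Char) :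
    pvCnt (u ++ [c]) = pvBmp (pvCnt u) c := by
  simp [pvCnt, List.foldl_append]

-- a -1 bump followed by a +1 bump at the same slot is the identity
theorem pvBump_cancel (l : List Int) (j : Int) (hl : l.length = 26)
    (h1 : -26 ≤ j) (h2 : j < 26) :
    pvBump (pvBump l j (-1)) j 1 = l := by
  have helt := pvE_lt j h1 h2
  have hlen : (pvBump l j (-1)).length = 26 := by
    rw [pvBumpE l j (-1) hl h1 h2]; simp [hl]
  rw [pvBumpE l j (-1) hl h1 h2, pvBumpE _ j 1 (by simp [hl]) h1 h2]
  apply List.ext_getElem (by simp [hl])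
  intro n hn1 hn2
  rw [List.getElem_set]
  by_cases h : pvE j = n
  · subst h
    have hset : (l.set (pvE j) (l.getD (pvE j) 0 + -1)).getD (pvE j) 0
        = l.getD (pvE j) 0 + -1 := by
      rw [List.getD_eq_getElem _ 0 (by simp [hl]; omega), List.getElem_set_self]
    have hx : l.getD (pvE j) 0 = l[pvE j]'(by omega) := List.getD_eq_getElem l 0 (by omega)
    simp only [if_true, hset]
    omega
  · rw [if_neg h, List.getElem_set, if_neg h]

-- the body of A's slide updates the window counts to the next window's counts
theorem pvStep_cnt (s : List Char) (hs : ∀ c ∈ s, pvOk c) (m : Int) (hm : 0 ≤ m)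
    (j : Int) (hj1 : m ≤ j) (hj2 : j < (s.length : Int)) :
    pvBump (pvBump (pvCnt ((s.drop (j - m).toNat).take m.toNat))
        (((PySem.List.pyGetD s (j - m) ' ').toNat : Int) - 97) (-1))
      (((PySem.List.pyGetD s j ' ').toNat : Int) - 97) 1
    = pvCnt ((s.drop (j - m + 1).toNat).take m.toNat) := by
  have hwmem : ∀ k : Nat, ∀ x ∈ (s.drop k).take m.toNat, pvOk x := fun k x hx =>
    hs x (List.mem_of_mem_drop (List.mem_of_mem_take hx))
  have hjn : j.toNat < s.length := by omega
  have hg1 : PySem.List.pyGetD s (j - m) ' ' = s[(j - m).toNat]'(by omega) :=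
    PySem.List.pyGetD_eq_getElem s ' ' (by omega) (by omega)
  have hg2 : PySem.List.pyGetD s j ' ' = s[j.toNat]'hjn :=
    PySem.List.pyGetD_eq_getElem s ' ' (by omega) (by omega)
  rw [hg1, hg2]
  by_cases hm0 : m = 0
  · subst hm0
    have hjj : (j - 0).toNat = j.toNat := by omega
    have hok := pvOk_range _ (hs _ (List.getElem_mem hjn))
    simp only [Int.toNat_zero, List.take_zero, hjj]
    exact pvBump_cancel _ _ (by simp [pvCnt]) hok.1 hok.2
  · have hm1 : 1 ≤ m.toNat := by omega
    have hkm : (j - m).toNat + m.toNat = j.toNat := by omega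
    have hdlen : (s.drop ((j - m).toNat + 1)).length = s.length - ((j - m).toNat + 1) := by simp
    have hmid1 : m.toNat - 1 < (s.drop ((j - m).toNat + 1)).length := by omega
    have hwin1 : (s.drop (j - m).toNat).take m.toNat
        = s[(j - m).toNat]'(by omega) :: (s.drop ((j - m).toNat + 1)).take (m.toNat - 1) := by
      rw [List.drop_eq_getElem_cons (by omega : (j - m).toNat < s.length),
        show m.toNat = (m.toNat - 1) + 1 by omega, List.take_succ_cons]
      congr 2
    have hgd : (s.drop ((j - m).toNat + 1))[m.toNat - 1]'hmid1 = s[j.toNat]'hjn := by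
      rw [List.getElem_drop]; congr 1; omega
    have hwin2 : (s.drop ((j - m).toNat + 1)).take m.toNat
        = (s.drop ((j - m).toNat + 1)).take (m.toNat - 1) ++ [s[j.toNat]'hjn] := by
      conv_lhs => rw [show m.toNat = (m.toNat - 1) + 1 by omega]
      rw [List.take_succ, List.getElem?_eq_getElem hmid1, hgd]
      rfl
    have hknext : (j - m + 1).toNat = (j - m).toNat + 1 := by omega
    rw [hknext, hwin1,
      pvRemove_head _ _ (hs _ (List.getElem_mem (by omega)))
        (fun x hx => hs x (List.mem_of_mem_drop (List.mem_of_mem_take hx))),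
      hwin2, pvCnt_snoc]
    rfl

-- the sliding loop of A, under the window-counts invariant, is a filtered range
theorem pvSlide (s : List Char) (hs : ∀ c ∈ s, pvOk c) (m : Int) (hm : 0 ≤ m) (tgt : List Int) :
    ∀ (fuel : Nat) (j : Int), m ≤ j → j ≤ (s.length : Int) → fuel = ((s.length : Int) - j).toNat →
    ∀ res : List Int,
    ((PySem.List.pyRange j (s.length : Int) 1).foldl (pvStepA s m tgt)
        (pvCnt ((s.drop (j - m).toNat).take m.toNat), res)).2
      = res ++ ((PySem.List.pyRange j (s.length : Int) 1).filter
          (fun i => decide (pvCnt ((s.drop (i - m + 1).toNat).take m.toNat) = tgt))).map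
          (fun i => i - m + 1) := by
  intro fuel
  induction fuel with
  | zero =>
    intro j hj1 hj2 hfuel res
    rw [PySem.List.pyRange_one_eq_nil (by omega)]
    simp
  | succ f ih =>
    intro j hj1 hj2 hfuel res
    have hjlt : j < (s.length : Int) := by omega
    rw [PySem.List.pyRange_one_cons hjlt]
    simp only [List.foldl_cons, List.filter_cons]
    have hstep : pvStepA s m tgt (pvCnt ((s.drop (j - m).toNat).take m.toNat), res) j
        = (pvCnt ((s.drop (j - m + 1).toNat).take m.toNat),
           if pvCnt ((s.drop (j - m + 1).toNat).take m.toNat) = tgt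
           then res ++ [j - m + 1] else res) := by
      simp only [pvStepA]
      rw [pvStep_cnt s hs m hm j hj1 hjlt]
    rw [hstep]
    have he : j + 1 - m = j - m + 1 := by ring
    have ihj := ih (j + 1) (by omega) (by omega) (by omega)
    rw [he] at ihj
    by_cases hc : pvCnt ((s.drop (j - m + 1).toNat).take m.toNat) = tgt
    · rw [if_pos hc, ihj (res ++ [j - m + 1]), if_pos (by exact decide_eq_true hc)]
      simp
    · rw [if_neg hc, ihj res, if_neg (by simpa using hc)]

-- the prefix-table fold builds the counts of every prefix of s
theorem pvPrefix (s : List Char) :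
    s.foldl pvRowB [List.replicate 26 0]
      = (List.range (s.length + 1)).map (fun k => pvCnt (s.take k)) := by
  induction s using List.reverseRecOn with
  | nil => simp [pvCnt, List.range_succ]
  | append_singleton u c ih =>
    rw [List.foldl_append, List.foldl_cons, List.foldl_nil, ih]
    unfold pvRowB
    have hne : (List.range (u.length + 1)).map (fun k => pvCnt (u.take k)) ≠ [] := by simp
    rw [PySem.List.pyGetD_neg_one _ _ hne]
    have hlast : ((List.range (u.length + 1)).map (fun k => pvCnt (u.take k))).getLast hne
        = pvCnt u := by
      rw [List.getLast_eq_getElem]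
      simp [List.take_length]
    rw [hlast]
    have happ : pvBump (pvCnt u) ((c.toNat : Int) - 97) 1 = pvCnt (u ++ [c]) :=
      (pvCnt_snoc u c).symm
    have hR : (List.range ((u ++ [c]).length + 1)).map (fun k => pvCnt ((u ++ [c]).take k))
        = (List.range (u.length + 1)).map (fun k => pvCnt (u.take k)) ++ [pvCnt (u ++ [c])] := by
      rw [show (u ++ [c]).length = u.length + 1 by simp, List.range_succ, List.map_append]
      congr 1
      · apply List.map_congr_left
        intro k hk
        rw [List.mem_range] at hk
        rw [List.take_append_of_le_length (by omega)]
      · rw [List.map_singleton, List.take_of_length_le (by simp)]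
    rw [happ, hR]

-- indexing into the prefix table
theorem pvPreGet (g : Nat → List Int) (N : Nat) (i : Int) (h0 : 0 ≤ i) (h1 : i ≤ (N : Int)) :
    PySem.List.pyGetD ((List.range (N + 1)).map g) i [] = g i.toNat := by
  rw [PySem.List.pyGetD_eq_getElem _ [] h0
    (by rw [List.length_map, List.length_range]; push_cast; omega)]
  rw [List.getElem_map, List.getElem_range]

-- shifting a filtered range by the window offset
theorem pvShift (Q : Int → Prop) [DecidablePred Q] (m : Int) :
    ∀ (fuel : Nat) (j n : Int), fuel = (n - j).toNat →
    ((PySem.List.pyRange j n 1).filter (fun i => decide (Q (i - m + 1)))).map (fun i => i - m + 1)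
      = (PySem.List.pyRange (j - m + 1) (n - m + 1) 1).filter (fun x => decide (Q x)) := by
  intro fuel
  induction fuel with
  | zero =>
    intro j n hfuel
    rw [PySem.List.pyRange_one_eq_nil (by omega), PySem.List.pyRange_one_eq_nil (by omega)]
    simp
  | succ f ih =>
    intro j n hfuel
    by_cases hjn : j < n
    · rw [PySem.List.pyRange_one_cons hjn,
        PySem.List.pyRange_one_cons (show j - m + 1 < n - m + 1 by omega)]
      simp only [List.filter_cons]
      have ihj := ih (j + 1) n (by omega)
      by_cases hq : Q (j - m + 1)
      · rw [if_pos (by exact decide_eq_true hq), if_pos (by exact decide_eq_true hq),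
          List.map_cons, ihj, show j + 1 - m + 1 = j - m + 1 + 1 from by ring]
      · rw [if_neg (by simpa using hq), if_neg (by simpa using hq), ihj,
          show j + 1 - m + 1 = j - m + 1 + 1 from by ring]
    · rw [PySem.List.pyRange_one_eq_nil (by omega), PySem.List.pyRange_one_eq_nil (by omega)]
      simp

-- the initial-window fold of A computes the counts of the first m characters
theorem pvInitWin (s : List Char) (m : Int) (h0 : 0 ≤ m) (hmn : m ≤ (s.length : Int)) :
    (PySem.List.pyRange 0 m 1).foldl
      (fun mp i => pvBump mp (((PySem.List.pyGetD s i ' ').toNat : Int) - 97) 1)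
      (List.replicate 26 0) = pvCnt (s.take m.toNat) := by
  have hlen : ((s.take m.toNat).length : Int) = m := by simp; omega
  have hcongr : ∀ (acc : List Int), ∀ i ∈ PySem.List.pyRange 0 m 1,
      pvBump acc (((PySem.List.pyGetD s i ' ').toNat : Int) - 97) 1
        = pvBump acc (((PySem.List.pyGetD (s.take m.toNat) i ' ').toNat : Int) - 97) 1 := by
    intro acc i hi
    rw [PySem.List.mem_pyRange_one] at hi
    have hit : i.toNat < (s.take m.toNat).length := by simp; omega
    rw [PySem.List.pyGetD_eq_getElem s ' ' (by omega) (by omega),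
        PySem.List.pyGetD_eq_getElem (s.take m.toNat) ' ' (by omega) (by omega),
        List.getElem_take]
  have hfold := PySem.List.foldl_pyRange_zero_pyGetD' (s.take m.toNat) ' '
    (fun acc ch => pvBump acc ((ch.toNat : Int) - 97) 1) (List.replicate 26 0)
  rw [hlen] at hfold
  rw [PySem.List.foldl_congr_mem _ _ _ _ hcongr, hfold]
  rfl

-- ===== VERDICT (by name: the statement is the Claim_ definition above) =====
theorem find_anagrams_sliding_window_spec : Claim_equal_find_anagrams_sliding_window := by
  intro str ptr _ hpre
  unfold Spec_find_anagrams_sliding_window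
  unfold find_anagrams_sliding_window find_anagrams_sliding_window_alt
  simp only []
  by_cases hmn : (ptr.toList.length : Int) > (str.toList.length : Int)
  · rw [if_pos hmn, if_pos hmn]
  · rw [if_neg hmn, if_neg hmn]
    have hall : ∀ c ∈ ptr.toList ++ str.toList, pvOk c := by
      rcases hpre with h | h
      · exfalso; omega
      · intro c hc
        simpa [pvOk] using List.all_eq_true.mp h c hc
    have hp : ∀ c ∈ ptr.toList, pvOk c := fun c hc => hall c (by simp [hc])
    have hs : ∀ c ∈ str.toList, pvOk c := fun c hc => hall c (by simp [hc])
    have hm0 : (0 : Int) ≤ (ptr.toList.length : Int) := by positivity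
    have hmn' : (ptr.toList.length : Int) ≤ (str.toList.length : Int) := by omega
    have hPtr : ptr.toList.foldl (fun mp ch => pvBump mp ((ch.toNat : Int) - 97) 1)
        (List.replicate 26 0) = pvCnt ptr.toList := rfl
    rw [hPtr, pvInitWin str.toList (ptr.toList.length : Int) hm0 hmn']
    have hwin0 : pvCnt (str.toList.take ((ptr.toList.length : Int)).toNat)
        = pvCnt ((str.toList.drop ((ptr.toList.length : Int) - (ptr.toList.length : Int)).toNat).take
            ((ptr.toList.length : Int)).toNat) := by
      rw [show (ptr.toList.length : Int) - (ptr.toList.length : Int) = 0 by ring]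
      simp
    rw [hwin0,
      pvSlide str.toList hs (ptr.toList.length : Int) hm0 (pvCnt ptr.toList)
        (((str.toList.length : Int) - (ptr.toList.length : Int)).toNat)
        (ptr.toList.length : Int) (le_refl _) hmn' (by omega) _,
      pvShift (fun x : Int => pvCnt ((str.toList.drop x.toNat).take
          ((ptr.toList.length : Int)).toNat) = pvCnt ptr.toList)
        (ptr.toList.length : Int)
        (((str.toList.length : Int) - (ptr.toList.length : Int)).toNat)
        (ptr.toList.length : Int) (str.toList.length : Int) (by omega),
      show (ptr.toList.length : Int) - (ptr.toList.length : Int) + 1 = 1 by ring]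
    -- B side
    rw [pvPrefix str.toList,
      PySem.List.foldl_append_ite_eq_filter
        (fun i : Int => List.zipWith (fun a b => a - b)
            (PySem.List.pyGetD ((List.range (str.toList.length + 1)).map
              (fun k => pvCnt (str.toList.take k))) (i + (ptr.toList.length : Int)) [])
            (PySem.List.pyGetD ((List.range (str.toList.length + 1)).map
              (fun k => pvCnt (str.toList.take k))) i [])
          = pvCnt ptr.toList) _ [],
      List.nil_append]
    have hfc : (PySem.List.pyRange 0 ((str.toList.length : Int) - (ptr.toList.length : Int) + 1) 1).filter
          (fun i : Int => decide (List.zipWith (fun a b => a - b)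
            (PySem.List.pyGetD ((List.range (str.toList.length + 1)).map
              (fun k => pvCnt (str.toList.take k))) (i + (ptr.toList.length : Int)) [])
            (PySem.List.pyGetD ((List.range (str.toList.length + 1)).map
              (fun k => pvCnt (str.toList.take k))) i [])
          = pvCnt ptr.toList))
        = (PySem.List.pyRange 0 ((str.toList.length : Int) - (ptr.toList.length : Int) + 1) 1).filter
          (fun i : Int => decide (pvCnt ((str.toList.drop i.toNat).take
            ((ptr.toList.length : Int)).toNat) = pvCnt ptr.toList)) := by
      apply List.filter_congr
      intro i hi
      rw [PySem.List.mem_pyRange_one] at hi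
      rw [decide_eq_decide]
      have hg1 := pvPreGet (fun k => pvCnt (str.toList.take k)) str.toList.length
        (i + (ptr.toList.length : Int)) (by omega) (by omega)
      have hg2 := pvPreGet (fun k => pvCnt (str.toList.take k)) str.toList.length i
        (by omega) (by omega)
      rw [hg1, hg2]
      beta_reduce
      have htk : str.toList.take (i + (ptr.toList.length : Int)).toNat
          = str.toList.take i.toNat ++ (str.toList.drop i.toNat).take
              ((ptr.toList.length : Int)).toNat := by
        rw [show (i + (ptr.toList.length : Int)).toNat
            = i.toNat + ((ptr.toList.length : Int)).toNat by omega, List.take_add]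
      rw [htk, pvSub_cnt _ _ (fun x hx => hs x (List.mem_of_mem_take hx))
        (fun x hx => hs x (List.mem_of_mem_drop (List.mem_of_mem_take hx)))]
    rw [hfc, PySem.List.pyRange_one_cons
        (show (0 : Int) < (str.toList.length : Int) - (ptr.toList.length : Int) + 1 by omega),
      List.filter_cons]
    have hc0 : pvCnt ((str.toList.drop ((ptr.toList.length : Int)
          - (ptr.toList.length : Int)).toNat).take ((ptr.toList.length : Int)).toNat)
        = pvCnt ((str.toList.drop ((0 : Int)).toNat).take ((ptr.toList.length : Int)).toNat) := by
      rw [show ((ptr.toList.length : Int) - (ptr.toList.length : Int)).toNat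
          = ((0 : Int)).toNat by omega]
    rw [hc0]
    by_cases hq0 : pvCnt ((str.toList.drop ((0 : Int)).toNat).take
        ((ptr.toList.length : Int)).toNat) = pvCnt ptr.toList
    · rw [if_pos hq0, if_pos (by exact decide_eq_true hq0)]
      rfl
    · rw [if_neg hq0, if_neg (by simpa using hq0)]
      rfl
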